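-- pv_equiv track=rewrite | github.com/buntyrizvi110/search | app.py | search_content
-- ===== SOURCE A (Python) =====
-- def search_content(text: str, query: str) -> str | None:
--     query_words = query.lower().split()
--     lines = [line.strip() for line in text.splitlines() if line.strip()]
--
--     scored = []
--
--     for line in lines:
--         line_lower = line.lower()
--         score = sum(1 for word in query_words if word in line_lower)
--         if score > 0:
--             scored.append((score, line))
--
--     if not scored:
--         return None
--
--     scored.sort(reverse=True, key=lambda x: x[0])
--     best_lines = [line for score, line in scored[:15]]
--     return "\n".join(best_lines)
-- ===== SOURCE B (Python) =====
-- def search_content(text: str, query: str) -> str | None: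
--     query_words = query.lower().split()
--     w = len(query_words)
--     buckets = [[] for _ in range(w + 1)]
--     for raw in text.splitlines():
--         line = raw.strip()
--         if not line:
--             continue
--         line_lower = line.lower()
--         score = 0
--         for word in query_words:
--             if word in line_lower:
--                 score += 1
--         if score:
--             buckets[score].append(line)
--     best = []
--     for s in reversed(range(1, w + 1)):
--         best.extend(buckets[s])
--     if not best:
--         return None
--     return "\n".join(best[:15])
-- ===== Notes on version B (the rewrite author's own statement) =====
-- stated objective: alternative
-- what changed: Replaces building a (score,line) list and stable reverse-sorting it with single-pass bucketing by score (buckets 1..len(query_words)) emitted from highest bucket down, which reproduces the stable reverse order without sorting.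
import Mathlib
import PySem

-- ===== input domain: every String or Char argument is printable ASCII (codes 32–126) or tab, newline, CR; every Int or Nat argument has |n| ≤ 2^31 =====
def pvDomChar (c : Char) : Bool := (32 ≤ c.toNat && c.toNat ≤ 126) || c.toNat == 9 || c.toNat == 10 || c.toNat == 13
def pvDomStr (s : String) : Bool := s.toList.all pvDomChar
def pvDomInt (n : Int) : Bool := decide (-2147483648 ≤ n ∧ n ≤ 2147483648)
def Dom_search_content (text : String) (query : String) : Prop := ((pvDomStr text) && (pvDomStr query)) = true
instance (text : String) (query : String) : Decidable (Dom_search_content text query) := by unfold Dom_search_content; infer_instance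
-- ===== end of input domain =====

-- B replaces A's build-then-stable-reverse-sort of (score, line) pairs by one-pass bucketing
-- per score, emitting buckets from the highest score down (alternative decomposition).

-- ===== PORT A =====
def search_content (text : String) (query : String) : Option String :=
  let query_words := PySem.Str.split₀ (PySem.Str.lower query)
  let lines := ((PySem.Str.splitlines text).filter (fun l => PySem.Str.strip l != "")).map
      (fun l => PySem.Str.strip l)
  let scored := lines.foldl (fun acc line =>
      let line_lower := PySem.Str.lower line
      let score : Int := (query_words.map
        (fun word => if PySem.Str.isIn word line_lower then (1 : Int) else 0)).sum
      if 0 < score then acc ++ [(score, line)] else acc) []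
  if scored = [] then none
  else
    let sortedScored := PySem.List.sorted scored (fun x => x.1) true
    let best_lines := (PySem.List.slice sortedScored none (some 15)).map (fun x => x.2)
    some (PySem.Str.join "\n" best_lines)

-- ===== PORT B =====
def search_content_alt (text : String) (query : String) : Option String :=
  let query_words := PySem.Str.split₀ (PySem.Str.lower query)
  let w := query_words.length
  let buckets := (PySem.Str.splitlines text).foldl (fun bs raw =>
      let line := PySem.Str.strip raw
      if line == "" then bs
      else
        let line_lower := PySem.Str.lower line
        let score : Int := query_words.foldl
          (fun s word => if PySem.Str.isIn word line_lower then s + 1 else s) 0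
        if score ≠ 0 then bs.set score.toNat (bs.getD score.toNat [] ++ [line]) else bs)
    (List.replicate (w + 1) [])
  let best := ((PySem.List.pyRange 1 ((w : Int) + 1) 1).reverse).foldl
      (fun acc s => acc ++ buckets.getD s.toNat []) []
  if best = [] then none
  else some (PySem.Str.join "\n" (PySem.List.slice best none (some 15)))

-- ===== PRECONDITION & SPEC =====
def Spec_search_content (text : String) (query : String) (out : Option String) : Prop := out = search_content_alt text query
instance (text : String) (query : String) (out : Option String) : Decidable (Spec_search_content text query out) := by unfold Spec_search_content; infer_instance

-- ===== CLAIM (what is proved, stated in full; the proofs are below) =====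
def Claim_equal_search_content : Prop := ∀ (text : String) (query : String), Dom_search_content text query → Spec_search_content text query (search_content text query)

-- ===== LEMMAS AND PROOFS =====

def pvCnt (qw : List String) (l : String) : Nat :=
  qw.countP (fun w => PySem.Str.isIn w (PySem.Str.lower l))

def pvLines (text : String) : List String :=
  ((PySem.Str.splitlines text).filter (fun l => PySem.Str.strip l != "")).map
    (fun l => PySem.Str.strip l)

def pvBest (qw : List String) (lines : List String) : List String :=
  ((List.range qw.length).reverse).flatMap
    (fun j => lines.filter (fun l => pvCnt qw l == j + 1))

def pvKs (w : Nat) : List Int := (List.range w).reverse.map (fun (j : Nat) => (j : Int) + 1)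

lemma pvKs_pairwise (w : Nat) : (pvKs w).Pairwise (fun a b => b < a) := by
  have h1 : (List.range w).reverse.Pairwise (fun a b => b < a) :=
    List.pairwise_reverse.mpr (by simpa using List.pairwise_lt_range)
  exact List.Pairwise.map (fun (j : Nat) => (j : Int) + 1) (fun {a b} h => by simp only []; omega) h1

lemma mem_pvKs {w : Nat} {c : Nat} (h1 : 0 < c) (h2 : c ≤ w) : ((c : Nat) : Int) ∈ pvKs w := by
  exact List.mem_map.mpr
    ⟨c - 1, List.mem_reverse.mpr (List.mem_range.mpr (by omega)), by omega⟩

lemma pvBest_eq_nil_iff (qw : List String) (lines : List String) :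
    pvBest qw lines = [] ↔ lines.filter (fun l => decide (0 < pvCnt qw l)) = [] := by
  have hle : ∀ l, pvCnt qw l ≤ qw.length := fun l => List.countP_le_length
  simp only [pvBest, List.flatMap_eq_nil_iff, List.filter_eq_nil_iff, List.mem_reverse,
    List.mem_range, beq_iff_eq, decide_eq_true_eq]
  constructor
  · intro h l hl hc
    exact h (pvCnt qw l - 1) (by have := hle l; omega) l hl (by omega)
  · intro h j hj l hl hc
    exact h l hl (by omega)

lemma insertBy_append_not {α : Type} (before : α → α → Bool) (x : α) (as bs : List α)
    (h : ∀ a ∈ as, before x a = false) :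
    PySem.List.insertBy before x (as ++ bs) = as ++ PySem.List.insertBy before x bs := by
  induction as with
  | nil => simp
  | cons a t ih =>
    simp only [List.cons_append, PySem.List.insertBy, h a (by simp)]
    simp only [Bool.false_eq_true, if_false, List.cons.injEq, true_and]
    exact ih (fun a ha => h a (by simp [ha]))

lemma insertBy_all_before {α : Type} (before : α → α → Bool) (x : α) (bs : List α)
    (h : ∀ b ∈ bs, before x b = true) :
    PySem.List.insertBy before x bs = x :: bs := by
  cases bs with
  | nil => rfl
  | cons b t => simp [PySem.List.insertBy, h b (by simp)]

lemma insertBy_flatMap {α : Type} (key : α → Int) (x : α) (ks : List Int) (g : Int → List α)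
    (hks : ks.Pairwise (fun a b => b < a)) (hx : key x ∈ ks)
    (hg : ∀ k, ∀ y ∈ g k, key y = k) :
    PySem.List.insertBy (fun a b => decide (key b < key a)) x (ks.flatMap g)
      = ks.flatMap (fun k => g k ++ if key x == k then [x] else []) := by
  induction ks with
  | nil => simp at hx
  | cons k ks' ih =>
    have hlt : ∀ k' ∈ ks', k' < k := fun k' h' => (List.pairwise_cons.1 hks).1 k' h'
    simp only [List.flatMap_cons]
    by_cases hkx : key x = k
    · have h1 : ∀ a ∈ g k, (decide (key a < key x) : Bool) = false := by
        intro a ha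
        have := hg k a ha
        simp [this, hkx]
      rw [insertBy_append_not _ _ _ _ h1]
      have h2 : ∀ b ∈ ks'.flatMap g, (decide (key b < key x) : Bool) = true := by
        intro b hb
        obtain ⟨k', hk', hbk'⟩ := List.mem_flatMap.1 hb
        have := hg k' b hbk'
        simp [this, hkx]
        exact hlt k' hk'
      rw [insertBy_all_before _ _ _ h2]
      have h3 : ks'.flatMap (fun k => g k ++ if key x == k then [x] else []) = ks'.flatMap g := by
        apply List.flatMap_congr  -- may not exist; fallback below
        intro k' hk'
        have : (key x == k') = false := by
          simp [hkx]
          exact ne_of_gt (hlt k' hk')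
        simp [this]
      rw [h3, hkx]
      simp
    · have hxks' : key x ∈ ks' := by
        rcases List.mem_cons.1 hx with h | h
        · exact absurd h hkx
        · exact h
      have hxlt : key x < k := hlt _ hxks'
      have h1 : ∀ a ∈ g k, (decide (key a < key x) : Bool) = false := by
        intro a ha
        have := hg k a ha
        simp [this]
        omega
      rw [insertBy_append_not _ _ _ _ h1]
      rw [ih (List.pairwise_cons.1 hks).2 hxks']
      have : (key x == k) = false := by simp [hkx]
      simp [this]

lemma sorted_rev_buckets {α : Type} (key : α → Int) (xs : List α) (ks : List Int)
    (hks : ks.Pairwise (fun a b => b < a)) (hmem : ∀ x ∈ xs, key x ∈ ks) :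
    PySem.List.sorted xs key true = ks.flatMap (fun k => xs.filter (fun x => key x == k)) := by
  rw [PySem.List.sorted_rev_eq_foldl_insertBy]
  induction xs using List.reverseRecOn with
  | nil => simp
  | append_singleton t x ih =>
    rw [List.foldl_append]
    simp only [List.foldl_cons, List.foldl_nil]
    rw [ih (fun y hy => hmem y (by simp [hy]))]
    rw [insertBy_flatMap key x ks _ hks (hmem x (by simp))
      (fun k y hy => by simpa using (List.of_mem_filter hy))]
    apply List.flatMap_congr
    intro k hk
    rw [List.filter_append]
    simp [List.filter_cons, beq_iff_eq]

lemma a_side (text query : String) :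
    search_content text query =
      (if pvBest (PySem.Str.split₀ (PySem.Str.lower query)) (pvLines text) = [] then none
       else some (PySem.Str.join "\n"
         ((pvBest (PySem.Str.split₀ (PySem.Str.lower query)) (pvLines text)).take 15))) := by
  set qw := PySem.Str.split₀ (PySem.Str.lower query) with hqw
  have hsum : ∀ line, (qw.map
      (fun word => if PySem.Str.isIn word (PySem.Str.lower line) then (1 : Int) else 0)).sum
      = ((pvCnt qw line : Nat) : Int) := by
    intro line
    exact PySem.List.sum_map_ite_one_zero _ _
  have hcle : ∀ l, pvCnt qw l ≤ qw.length := fun l => List.countP_le_length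
  have h0 : search_content text query =
      (let scored := (pvLines text).foldl (fun acc line =>
        if 0 < (qw.map
          (fun word => if PySem.Str.isIn word (PySem.Str.lower line) then (1 : Int) else 0)).sum
        then acc ++ [((qw.map
          (fun word => if PySem.Str.isIn word (PySem.Str.lower line) then (1 : Int) else 0)).sum,
          line)] else acc) [];
       if scored = [] then none
       else some (PySem.Str.join "\n"
         ((PySem.List.slice (PySem.List.sorted scored (fun x => x.1) true) none (some 15)).map
           (fun x => x.2)))) := rfl
  rw [h0]
  simp only [hsum]
  rw [PySem.List.foldl_append_ite (fun line => 0 < ((pvCnt qw line : Nat) : Int))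
      (fun line => (((pvCnt qw line : Nat) : Int), line))]
  rw [List.nil_append]
  have hfilt : (pvLines text).filter (fun x => decide (0 < ((pvCnt qw x : Nat) : Int)))
      = (pvLines text).filter (fun l => decide (0 < pvCnt qw l)) :=
    List.filter_congr (fun l _ => by simp)
  rw [hfilt]
  set lines := pvLines text with hlines
  set F := lines.filter (fun l => decide (0 < pvCnt qw l)) with hF
  set M := F.map (fun l => ((pvCnt qw l : Int), l)) with hM
  by_cases hb : pvBest qw lines = []
  · have hFnil : F = [] := (pvBest_eq_nil_iff qw lines).mp hb
    rw [hb]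
    rw [hM, hFnil]
    simp
  · have hne : ¬ M = [] := by
      rw [hM, List.map_eq_nil_iff, hF]
      exact fun h => hb ((pvBest_eq_nil_iff qw lines).mpr h)
    rw [if_neg hne, if_neg hb]
    refine congrArg (fun t => some (PySem.Str.join "\n" t)) ?_
    rw [PySem.List.slice_to _ (by norm_num : (0:Int) ≤ 15)]
    rw [List.map_take]
    show List.take ((15:Int).toNat) _ = _
    have h15 : ((15:Int)).toNat = 15 := rfl
    rw [h15]
    refine congrArg (List.take 15) ?_
    rw [sorted_rev_buckets (fun x => x.1) M (pvKs qw.length) (pvKs_pairwise qw.length) ?hmem]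
    case hmem =>
      intro x hx
      rw [hM] at hx
      obtain ⟨l, hl, rfl⟩ := List.mem_map.1 hx
      have h0 : 0 < pvCnt qw l := by simpa using (List.of_mem_filter hl)
      exact mem_pvKs h0 (hcle l)
    rw [List.map_flatMap]
    unfold pvBest pvKs
    rw [List.flatMap_map]
    apply List.flatMap_congr
    intro j hj
    rw [hM, List.filter_map, List.map_map]
    have hid : ((fun x : Int × String => x.2) ∘ fun l => ((pvCnt qw l : Int), l)) = id := rfl
    rw [hid, List.map_id, hF, List.filter_filter]
    apply List.filter_congr
    intro l _
    show (((pvCnt qw l : Int) == (j : Int) + 1) && decide (0 < pvCnt qw l)) = (pvCnt qw l == j + 1)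
    by_cases h : pvCnt qw l = j + 1
    · simp [h]
    · have hfalse : ((pvCnt qw l : Int) == (j : Int) + 1) = false := by
        simp only [beq_eq_false_iff_ne, ne_eq]
        intro hc; apply h; omega
      simp [hfalse, h]

lemma foldl_strip' (qw : List String) (l : List String) (init : List (List String)) :
    l.foldl (fun bs raw =>
        if PySem.Str.strip raw == "" then bs
        else
          if ¬ pvCnt qw (PySem.Str.strip raw) = 0 then
            bs.set (pvCnt qw (PySem.Str.strip raw))
              (bs.getD (pvCnt qw (PySem.Str.strip raw)) [] ++ [PySem.Str.strip raw])
          else bs) init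
      = ((l.filter (fun x => PySem.Str.strip x != "")).map
          (fun x => PySem.Str.strip x)).foldl
          (fun bs line => if ¬ pvCnt qw line = 0 then
            bs.set (pvCnt qw line) (bs.getD (pvCnt qw line) [] ++ [line]) else bs)
          init := by
  induction l generalizing init with
  | nil => rfl
  | cons x t ih =>
    simp only [List.foldl_cons, List.filter_cons]
    by_cases h : PySem.Str.strip x = ""
    · simp only [h]
      simp only [beq_self_eq_true, if_true]
      exact ih _
    · have hb : (PySem.Str.strip x == "") = false := by simp [h]
      have hb' : (PySem.Str.strip x != "") = true := by simp [h]
      simp only [hb, hb', Bool.false_eq_true, if_false, if_true, List.map_cons, List.foldl_cons]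
      exact ih _

lemma buckets_spec (cnt : String → Nat) (w : Nat) (hcle : ∀ l, cnt l ≤ w) (lines : List String) :
    ∀ (init : List (List String)), init.length = w + 1 →
      (lines.foldl (fun bs line => if cnt line ≠ 0 then
          bs.set (cnt line) (bs.getD (cnt line) [] ++ [line]) else bs) init).length = w + 1 ∧
      ∀ s : Nat, 0 < s →
        (lines.foldl (fun bs line => if cnt line ≠ 0 then
          bs.set (cnt line) (bs.getD (cnt line) [] ++ [line]) else bs) init).getD s []
        = init.getD s [] ++ lines.filter (fun l => cnt l == s) := by
  induction lines with
  | nil => intro init hlen; exact ⟨hlen, fun s _ => by simp⟩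
  | cons x t ih =>
    intro init hlen
    by_cases hx : cnt x = 0
    · simp only [List.foldl_cons, hx, ne_eq, not_true_eq_false, if_false]
      obtain ⟨h1, h2⟩ := ih init hlen
      refine ⟨h1, fun s hs => ?_⟩
      rw [h2 s hs]
      have hfx : (cnt x == s) = false := by simp [hx]; omega
      simp [hfx]
    · simp only [List.foldl_cons, ne_eq, hx, not_false_eq_true, if_true]
      set init' := init.set (cnt x) (init.getD (cnt x) [] ++ [x]) with hinit'
      have hlen' : init'.length = w + 1 := by rw [hinit', List.length_set, hlen]
      obtain ⟨h1, h2⟩ := ih init' hlen'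
      refine ⟨h1, fun s hs => ?_⟩
      rw [h2 s hs]
      by_cases hsx : cnt x = s
      · subst hsx
        have hlt : cnt x < init.length := by rw [hlen]; exact Nat.lt_succ_of_le (hcle x)
        have : init'.getD (cnt x) [] = init.getD (cnt x) [] ++ [x] := by
          rw [hinit', List.getD_eq_getElem?_getD, List.getElem?_set_self hlt]
          rfl
        rw [this]
        have htx : (cnt x == cnt x) = true := by simp
        simp [List.append_assoc]
      · have : init'.getD s [] = init.getD s [] := by
          rw [hinit', List.getD_eq_getElem?_getD, List.getElem?_set_ne hsx,
            ← List.getD_eq_getElem?_getD]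
        rw [this]
        have hfx : (cnt x == s) = false := by simp [hsx]
        simp [hfx]

lemma getD_replicate_nil (w s : Nat) :
    (List.replicate w ([] : List String)).getD s [] = [] := by
  rw [List.getD_eq_getElem?_getD, List.getElem?_replicate]
  by_cases h : s < w <;> simp [h]

lemma pyRange_desc (w : Nat) :
    PySem.List.pyRange 1 ((w : Int) + 1) 1 = (List.range w).map (fun (k : Nat) => 1 + 1 * (k : Int)) := by
  rw [PySem.List.pyRange_of_pos _ _ (by norm_num)]
  congr 1
  split_ifs with h
  · congr 1
    omega
  · have : w = 0 := by omega
    simp [this]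

lemma best_eq (w : Nat) (R : List (List String)) (lines qw : List String)
    (hget : ∀ s : Nat, 0 < s → R.getD s [] = lines.filter (fun l => pvCnt qw l == s))
    (hw : qw.length = w) :
    (List.range w).reverse.flatMap (fun (j : Nat) => R.getD ((1 + 1 * (j : Int)).toNat) [])
      = pvBest qw lines := by
  unfold pvBest
  rw [hw]
  apply List.flatMap_congr
  intro j hj
  have ht : ((1 + 1 * (j : Int))).toNat = j + 1 := by omega
  rw [ht, hget (j + 1) (Nat.succ_pos j)]

set_option maxHeartbeats 2000000 in
lemma b_side (text query : String) :
    search_content_alt text query =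
      (if pvBest (PySem.Str.split₀ (PySem.Str.lower query)) (pvLines text) = [] then none
       else some (PySem.Str.join "\n"
         ((pvBest (PySem.Str.split₀ (PySem.Str.lower query)) (pvLines text)).take 15))) := by
  set qw := PySem.Str.split₀ (PySem.Str.lower query) with hqw
  set w := qw.length with hw
  have hcle : ∀ l, pvCnt qw l ≤ w := fun l => List.countP_le_length
  have hscore : ∀ line, qw.foldl
      (fun s word => if PySem.Str.isIn word (PySem.Str.lower line) then s + 1 else s) (0 : Int)
      = ((pvCnt qw line : Nat) : Int) := by
    intro line
    rw [PySem.List.foldl_count_if]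
    simp [pvCnt]
  have h0 : search_content_alt text query =
      (let buckets := (PySem.Str.splitlines text).foldl (fun bs raw =>
        if PySem.Str.strip raw == "" then bs
        else
          if (qw.foldl (fun s word =>
              if PySem.Str.isIn word (PySem.Str.lower (PySem.Str.strip raw)) then s + 1 else s)
              (0 : Int)) ≠ 0
          then bs.set ((qw.foldl (fun s word =>
              if PySem.Str.isIn word (PySem.Str.lower (PySem.Str.strip raw)) then s + 1 else s)
              (0 : Int)).toNat)
            (bs.getD ((qw.foldl (fun s word =>
              if PySem.Str.isIn word (PySem.Str.lower (PySem.Str.strip raw)) then s + 1 else s)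
              (0 : Int)).toNat) [] ++ [PySem.Str.strip raw])
          else bs) (List.replicate (w + 1) []);
       let best := ((PySem.List.pyRange 1 ((w : Int) + 1) 1).reverse).foldl
          (fun acc s => acc ++ buckets.getD s.toNat []) [];
       if best = [] then none
       else some (PySem.Str.join "\n" (PySem.List.slice best none (some 15)))) := rfl
  rw [h0]
  simp only [hscore, Int.toNat_natCast, ne_eq, Nat.cast_eq_zero]
  rw [foldl_strip' qw (PySem.Str.splitlines text) (List.replicate (w + 1) [])]
  have hpl : ((PySem.Str.splitlines text).filter (fun x => PySem.Str.strip x != "")).map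
      (fun x => PySem.Str.strip x) = pvLines text := rfl
  rw [hpl]
  set lines := pvLines text with hlines
  set R := lines.foldl (fun bs line => if ¬ pvCnt qw line = 0 then
      bs.set (pvCnt qw line) (bs.getD (pvCnt qw line) [] ++ [line]) else bs)
      (List.replicate (w + 1) []) with hR
  have hspec := buckets_spec (pvCnt qw) w hcle lines (List.replicate (w + 1) [])
      (by simp)
  have hget : ∀ s : Nat, 0 < s → R.getD s [] = lines.filter (fun l => pvCnt qw l == s) := by
    intro s hs
    rw [hR]
    have h2 := hspec.2 s hs
    simp only [ne_eq] at h2 ⊢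
    rw [h2, getD_replicate_nil]
    simp
  rw [PySem.List.foldl_append_eq_flatMap, List.nil_append]
  rw [pyRange_desc, ← List.map_reverse, List.flatMap_map]
  have hbest := best_eq w R lines qw hget hw.symm
  rw [hbest]
  by_cases hb : pvBest qw lines = []
  · simp [hb]
  · rw [if_neg hb, if_neg hb]
    rw [PySem.List.slice_to _ (by norm_num : (0:Int) ≤ 15)]
    rfl

-- ===== VERDICT (by name: the statement is the Claim_ definition above) =====
theorem search_content_spec : Claim_equal_search_content := by
  intro text query _
  unfold Spec_search_content
  rw [a_side, b_side]
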